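-- pv_equiv track=rewrite | github.com/Yatogaii/LoopSCC | experiments/exp1/wsum/input/speed_popl10_fig2_2.py | input_loop
-- ===== SOURCE A (Python) =====
-- def input_loop(x, z):
--     path = ""
--
--     while x < 100:
--         if z > x:
--             x = x + 1
--             path += "A"
--         else:
--             z = z + 1
--             path += "B"
--     return [x, z, path]
-- ===== SOURCE B (Python) =====
-- def input_loop(x, z):
--     if x >= 100:
--         return [x, z, ""]
--     if z > x:
--         run = min(z - x, 100 - x)
--         x += run
--         if x == 100:
--             return [100, z, "A" * run]
--         return [100, 100, "A" * run + "BA" * (100 - x)]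
--     return [100, 100, "B" * (x - z) + "BA" * (100 - x)]
-- ===== Notes on version B (the rewrite author's own statement) =====
-- stated objective: faster
-- what changed: Replaces the per-step while-loop simulation by a closed-form case analysis that builds the path with string repetition ('A'*run, 'B'*run, 'BA'*tail) and computes the final counters arithmetically.
import Mathlib
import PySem

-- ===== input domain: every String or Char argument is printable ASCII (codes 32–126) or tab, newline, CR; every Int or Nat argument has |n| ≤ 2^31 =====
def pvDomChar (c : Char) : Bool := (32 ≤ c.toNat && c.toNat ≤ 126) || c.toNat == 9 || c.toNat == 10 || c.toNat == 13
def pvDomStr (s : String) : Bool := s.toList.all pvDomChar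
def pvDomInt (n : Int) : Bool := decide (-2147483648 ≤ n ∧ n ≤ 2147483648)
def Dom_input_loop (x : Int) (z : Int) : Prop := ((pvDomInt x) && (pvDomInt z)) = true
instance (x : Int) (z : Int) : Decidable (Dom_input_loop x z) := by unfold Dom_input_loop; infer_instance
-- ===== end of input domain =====

-- B replaces A's step-by-step while-loop simulation by a closed-form construction of the
-- path (an initial run of 'A's or 'B's, then an alternating "BA" tail built by repetition).

-- ===== PORT A =====
-- the while loop, as structural recursion on a fuel that provably dominates the number of
-- iterations (the loop's termination measure); path kept as List Char, String.ofList at the end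
def input_loop_go (fuel : Nat) (x : Int) (z : Int) (path : List Char) : Int × Int × List Char :=
  match fuel with
  | 0 => (x, z, path)
  | n + 1 =>
    if x < 100 then
      if z > x then input_loop_go n (x + 1) z (path ++ ['A'])
      else input_loop_go n x (z + 1) (path ++ ['B'])
    else (x, z, path)

def input_loop_fuel (x : Int) (z : Int) : Nat := (2 * (100 - x) + max (x - z + 1) 0).toNat

def input_loop (x : Int) (z : Int) : Int × Int × String :=
  let r := input_loop_go (input_loop_fuel x z) x z []
  (r.1, r.2.1, String.ofList r.2.2)

-- ===== PORT B =====
-- Python string repetition s * n (empty for n ≤ 0); exact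
def pvRep (s : List Char) (n : Int) : List Char := (List.replicate n.toNat s).flatten

def input_loop_altL (x : Int) (z : Int) : Int × Int × List Char :=
  if x ≥ 100 then (x, z, [])
  else if z > x then
    let run := min (z - x) (100 - x)
    let x' := x + run
    if x' = 100 then (100, z, pvRep ['A'] run)
    else (100, 100, pvRep ['A'] run ++ pvRep ['B', 'A'] (100 - x'))
  else (100, 100, pvRep ['B'] (x - z) ++ pvRep ['B', 'A'] (100 - x))

def input_loop_alt (x : Int) (z : Int) : Int × Int × String :=
  let r := input_loop_altL x z
  (r.1, r.2.1, String.ofList r.2.2)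

-- ===== PRECONDITION & SPEC =====
def Spec_input_loop (x : Int) (z : Int) (out : Int × Int × String) : Prop := out = input_loop_alt x z
instance (x : Int) (z : Int) (out : Int × Int × String) : Decidable (Spec_input_loop x z out) := by unfold Spec_input_loop; infer_instance

-- ===== CLAIM (what is proved, stated in full; the proofs are below) =====
def Claim_equal_input_loop : Prop := ∀ (x : Int) (z : Int), Dom_input_loop x z → Spec_input_loop x z (input_loop x z)

-- ===== LEMMAS AND PROOFS =====

theorem pvRep_nonpos (s : List Char) (n : Int) (h : n ≤ 0) : pvRep s n = [] := by
  unfold pvRep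
  rw [show n.toNat = 0 by omega]
  rfl

theorem pvRep_succ (s : List Char) (n : Int) (h : 1 ≤ n) : pvRep s n = s ++ pvRep s (n - 1) := by
  unfold pvRep
  rw [show n.toNat = (n - 1).toNat + 1 by omega, List.replicate_succ, List.flatten_cons]

theorem altL_stepA (x z : Int) (hx : x < 100) (hz : x < z) :
    input_loop_altL x z =
      ((input_loop_altL (x + 1) z).1, (input_loop_altL (x + 1) z).2.1,
        'A' :: (input_loop_altL (x + 1) z).2.2) := by
  simp only [input_loop_altL]
  split_ifs with h1 h2 h3 h4 h5 h6 h7 h8 h9 h10 h11 <;>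
    simp_all [Prod.ext_iff] <;> try omega
  · refine ⟨by omega, ?_⟩
    rw [show min (z - x) (100 - x) = (1 : Int) by omega, pvRep_succ _ _ (by omega),
      pvRep_nonpos _ _ (by omega)]
    rfl
  · rw [pvRep_succ ['A'] _ (by omega),
      show min (z - x) (100 - x) - 1 = min (z - (x + 1)) (100 - (x + 1)) by omega]
    rfl
  · rw [pvRep_succ ['A'] _ (by omega),
      show min (z - x) (100 - x) - 1 = min (z - (x + 1)) (100 - (x + 1)) by omega,
      show (100 - (x + min (z - x) (100 - x)))
         = (100 - (x + 1 + min (z - (x + 1)) (100 - (x + 1)))) by omega]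
    simp
  · rw [show min (z - x) (100 - x) = (1 : Int) by omega, pvRep_succ ['A'] 1 (by omega),
      pvRep_nonpos ['A'] _ (by omega), pvRep_nonpos ['B'] _ (by omega)]
    simp


theorem altL_stepB (x z : Int) (hx : x < 100) (hz : z ≤ x) :
    input_loop_altL x z =
      ((input_loop_altL x (z + 1)).1, (input_loop_altL x (z + 1)).2.1,
        'B' :: (input_loop_altL x (z + 1)).2.2) := by
  simp only [input_loop_altL]
  split_ifs with h1 h2 h3 h4 h5 h6 h7 h8 <;>
    simp_all [Prod.ext_iff] <;> try omega
  · refine ⟨by omega, ?_⟩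
    rw [pvRep_nonpos ['B'] _ (by omega), show (100 : Int) - x = 1 by omega,
      show min (z + 1 - x) (1 : Int) = 1 by omega, pvRep_succ ['B', 'A'] 1 (by omega),
      pvRep_succ ['A'] 1 (by omega), pvRep_nonpos ['B', 'A'] _ (by omega),
      pvRep_nonpos ['A'] _ (by omega)]
    simp
  · rw [pvRep_nonpos ['B'] _ (by omega), show min (z + 1 - x) (100 - x) = (1 : Int) by omega,
      pvRep_succ ['B', 'A'] (100 - x) (by omega), pvRep_succ ['A'] 1 (by omega),
      pvRep_nonpos ['A'] _ (by omega), show (100 : Int) - x - 1 = 100 - (x + 1) by omega]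
    simp
  · rw [pvRep_succ ['B'] (x - z) (by omega), show x - z - 1 = x - (z + 1) by omega]
    simp


theorem go_eq_altL (fuel : Nat) (x z : Int) (p : List Char)
    (hf : input_loop_fuel x z ≤ fuel) :
    input_loop_go fuel x z p =
      ((input_loop_altL x z).1, (input_loop_altL x z).2.1, p ++ (input_loop_altL x z).2.2) := by
  induction fuel generalizing x z p with
  | zero =>
      have hx : ¬ x < 100 := by
        unfold input_loop_fuel at hf; omega
      rw [input_loop_go, input_loop_altL, if_pos (show x ≥ 100 by omega)]
      simp
  | succ n ih =>
      rw [input_loop_go]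
      by_cases hx : x < 100
      · rw [if_pos hx]
        by_cases hz : z > x
        · rw [if_pos hz, ih _ _ _ (by unfold input_loop_fuel at hf ⊢; omega),
            altL_stepA x z hx hz]
          simp
        · rw [if_neg hz, ih _ _ _ (by unfold input_loop_fuel at hf ⊢; omega),
            altL_stepB x z hx (by omega)]
          simp
      · rw [if_neg hx, input_loop_altL, if_pos (by omega)]
        simp

-- ===== VERDICT (by name: the statement is the Claim_ definition above) =====
theorem input_loop_spec : Claim_equal_input_loop := by
  intro x z _
  unfold Spec_input_loop input_loop input_loop_alt
  rw [go_eq_altL _ _ _ _ (le_refl _)]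
  simp
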